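-- pv_equiv track=rewrite | github.com/monzag/Codecool-Management-System | views/view.py | create_border_row
-- ===== SOURCE A (Python) =====
-- def find_max_string_length(table, item_index, title_list):
--     '''
--     Finds longest string from all items of a given column index.
--
--     Args:
--         table (list) - list of lists of all the strings
--         item_index (int) - specific index in lists in table
--         title_list (list) - list containing table headers
--
--     Returns:
--         int - longest length value for a given index
--     '''
--
--     longest_string = ''
--
--     for a_list in table:
--         if len(str(a_list[item_index])) > len(longest_string):
--             longest_string = str(a_list[item_index])
--
--     if len(str(title_list[item_index])) > len(longest_string):
--         longest_string = str(title_list[item_index])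
--
--     return len(longest_string)
--
-- def create_border_row(table, columns_amount, title_list, row_type, MIN_COLUMN_WIDTH, CELL_PADDING):
--     '''
--     Generates a string to be later printed as an outer row in a table.
--
--     Args:
--         table (list) - list of lists of all the strings
--         columns_amount (int) - number of columns
--         title_list (list) - list containing table headers
--         row_type (str) - 'outer' or 'middle'
--         MIN_COLUMN_WIDTH (int)
--         CELL_PADDING (int)
--
--     Returns:
--         border_row (str) - string ready to be printed
--     '''
--
--     border_row = '|'
--
--     for column in range(columns_amount):
--         dashes_to_add = find_max_string_length(table, column, title_list)
--         if dashes_to_add >= MIN_COLUMN_WIDTH: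
--             border_row = border_row + ('-' * (dashes_to_add + CELL_PADDING) + '|')
--         else:
--             border_row = border_row + ('-' * MIN_COLUMN_WIDTH + '|')
--
--     if row_type == 'outer':
--         for char in border_row:
--             border_row.replace('|', '-')
--
--     return border_row
-- ===== SOURCE B (Python) =====
-- def create_border_row(table, columns_amount, title_list, row_type, MIN_COLUMN_WIDTH, CELL_PADDING):
--     '''Single pass over the table: all column widths are accumulated at once,
--     instead of re-scanning the whole table once per column.'''
--     m = max(columns_amount, 0)
--     widths = [len(title) for title in title_list[:m]]
--     for row in table:
--         for c, cell in enumerate(row[:m]):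
--             if len(cell) > widths[c]:
--                 widths[c] = len(cell)
--     border_row = '|'
--     for w in widths:
--         if w >= MIN_COLUMN_WIDTH:
--             border_row += '-' * (w + CELL_PADDING) + '|'
--         else:
--             border_row += '-' * MIN_COLUMN_WIDTH + '|'
--     return border_row
-- ===== Notes on version B (the rewrite author's own statement) =====
-- stated objective: faster
-- what changed: Instead of calling a helper that re-scans the whole table for every column (keeping the longest string itself), B makes one row-major pass accumulating all column widths as integers at once, then renders the border from the width list.
import Mathlib
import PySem

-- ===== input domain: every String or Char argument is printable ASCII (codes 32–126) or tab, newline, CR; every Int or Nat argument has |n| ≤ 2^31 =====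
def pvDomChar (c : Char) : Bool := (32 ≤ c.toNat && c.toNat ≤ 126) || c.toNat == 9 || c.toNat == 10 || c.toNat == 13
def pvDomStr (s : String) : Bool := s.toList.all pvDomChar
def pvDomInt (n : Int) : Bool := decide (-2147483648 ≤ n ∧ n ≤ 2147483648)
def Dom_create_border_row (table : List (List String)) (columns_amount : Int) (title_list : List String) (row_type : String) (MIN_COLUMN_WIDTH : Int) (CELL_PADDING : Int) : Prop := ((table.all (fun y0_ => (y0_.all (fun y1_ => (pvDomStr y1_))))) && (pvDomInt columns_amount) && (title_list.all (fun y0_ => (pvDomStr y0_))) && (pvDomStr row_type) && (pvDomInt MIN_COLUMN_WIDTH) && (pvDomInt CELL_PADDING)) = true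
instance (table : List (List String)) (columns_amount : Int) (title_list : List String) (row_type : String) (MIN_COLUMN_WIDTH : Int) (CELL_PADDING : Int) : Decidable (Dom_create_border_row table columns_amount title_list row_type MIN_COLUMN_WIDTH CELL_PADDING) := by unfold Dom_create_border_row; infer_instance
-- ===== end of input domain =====

-- B replaces A's per-column table re-scan (via a longest-string helper) by one row-major
-- pass that accumulates all column widths at once, then renders the border from that list.


-- ===== PORT A =====
-- find_max_string_length; none = IndexError (a_list[item_index] or title_list[item_index] out of range)
def pvFindMaxStringLength (table : List (List String)) (item_index : Int) (title_list : List String) : Option Int :=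
  (table.foldl
    (fun acc a_list => acc.bind fun longest =>
      (PySem.List.pyGet? a_list item_index).map fun s =>
        if PySem.Str.len s > PySem.Str.len longest then s else longest)
    (some "")).bind fun longest =>
    (PySem.List.pyGet? title_list item_index).map fun t =>
      PySem.Str.len (if PySem.Str.len t > PySem.Str.len longest then t else longest)

def create_border_row (table : List (List String)) (columns_amount : Int) (title_list : List String) (row_type : String) (MIN_COLUMN_WIDTH : Int) (CELL_PADDING : Int) : String :=
  let border :=
    (PySem.List.pyRange 0 columns_amount).foldl
      (fun acc column => acc.bind fun border_row =>
        (pvFindMaxStringLength table column title_list).map fun dashes_to_add =>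
          if dashes_to_add ≥ MIN_COLUMN_WIDTH then
            border_row ++ (PySem.List.pyRepeat ['-'] (dashes_to_add + CELL_PADDING) ++ ['|'])
          else
            border_row ++ (PySem.List.pyRepeat ['-'] MIN_COLUMN_WIDTH ++ ['|']))
      (some ['|'])
  -- A's final `if row_type == 'outer'` loop only evaluates border_row.replace and discards
  -- the result (str.replace does not mutate): a no-op, ported as nothing.
  match border with
  | some cs => String.mk cs
  | none => ""   -- unreachable under Pre_ (Python raises IndexError there)

-- ===== PORT B =====
def create_border_row_alt (table : List (List String)) (columns_amount : Int) (title_list : List String) (row_type : String) (MIN_COLUMN_WIDTH : Int) (CELL_PADDING : Int) : String :=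
  let m : Int := max columns_amount 0
  let widths0 : List Int := (PySem.List.slice title_list none (some m)).map PySem.Str.len
  let widths : List Int := table.foldl
    (fun ws row =>
      (PySem.List.enumerate (PySem.List.slice row none (some m))).foldl
        (fun ws2 p =>
          -- widths[c] read/written with the total forms; under Pre_ the index is in range
          if PySem.Str.len p.2 > PySem.List.pyGetD ws2 p.1 0
          then PySem.List.pySetD ws2 p.1 (PySem.Str.len p.2) else ws2)
        ws)
    widths0
  String.mk (widths.foldl
    (fun border_row w =>
      if w ≥ MIN_COLUMN_WIDTH then border_row ++ (PySem.List.pyRepeat ['-'] (w + CELL_PADDING) ++ ['|'])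
      else border_row ++ (PySem.List.pyRepeat ['-'] MIN_COLUMN_WIDTH ++ ['|']))
    ['|'])

-- ===== PRECONDITION & SPEC =====
-- A raises IndexError iff some needed column index is missing: excluded are exactly the
-- inputs where 0 < columns_amount and title_list or some row is shorter than columns_amount.
def Pre_create_border_row (table : List (List String)) (columns_amount : Int) (title_list : List String) (row_type : String) (MIN_COLUMN_WIDTH : Int) (CELL_PADDING : Int) : Prop :=
  0 < columns_amount → (columns_amount ≤ (title_list.length : Int) ∧ ∀ row ∈ table, columns_amount ≤ (row.length : Int))
instance (table : List (List String)) (columns_amount : Int) (title_list : List String) (row_type : String) (MIN_COLUMN_WIDTH : Int) (CELL_PADDING : Int) : Decidable (Pre_create_border_row table columns_amount title_list row_type MIN_COLUMN_WIDTH CELL_PADDING) := by unfold Pre_create_border_row; infer_instance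

def pvWitness_create_border_row : List (List String) × Int × List String × String × Int × Int :=
  ([["ab"], ["c"]], 1, ["Ti"], "outer", 2, 1)

def Spec_create_border_row (table : List (List String)) (columns_amount : Int) (title_list : List String) (row_type : String) (MIN_COLUMN_WIDTH : Int) (CELL_PADDING : Int) (out : String) : Prop := out = create_border_row_alt table columns_amount title_list row_type MIN_COLUMN_WIDTH CELL_PADDING
instance (table : List (List String)) (columns_amount : Int) (title_list : List String) (row_type : String) (MIN_COLUMN_WIDTH : Int) (CELL_PADDING : Int) (out : String) : Decidable (Spec_create_border_row table columns_amount title_list row_type MIN_COLUMN_WIDTH CELL_PADDING out) := by unfold Spec_create_border_row; infer_instance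

-- ===== CLAIM (what is proved, stated in full; the proofs are below) =====
def Claim_equal_create_border_row : Prop := ∀ (table : List (List String)) (columns_amount : Int) (title_list : List String) (row_type : String) (MIN_COLUMN_WIDTH : Int) (CELL_PADDING : Int), Dom_create_border_row table columns_amount title_list row_type MIN_COLUMN_WIDTH CELL_PADDING → Pre_create_border_row table columns_amount title_list row_type MIN_COLUMN_WIDTH CELL_PADDING → Spec_create_border_row table columns_amount title_list row_type MIN_COLUMN_WIDTH CELL_PADDING (create_border_row table columns_amount title_list row_type MIN_COLUMN_WIDTH CELL_PADDING)

-- ===== LEMMAS AND PROOFS =====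

-- the width A's helper computes for column c, as a plain max over the column
def pvW (table : List (List String)) (title_list : List String) (c : Nat) : Int :=
  max (table.foldl (fun m row => max m (PySem.Str.len (row.getD c ""))) 0)
      (PySem.Str.len (title_list.getD c ""))

theorem pvLenIf (a s : String) :
    PySem.Str.len (if PySem.Str.len s > PySem.Str.len a then s else a)
      = max (PySem.Str.len a) (PySem.Str.len s) := by
  split_ifs with h
  · exact (max_eq_right (le_of_lt h)).symm
  · exact (max_eq_left (le_of_not_gt h)).symm

theorem pvLa1' (c : Nat) : ∀ (tbl : List (List String)) (acc : String), (∀ row ∈ tbl, c < row.length) →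
    tbl.foldl
      (fun a r => a.bind fun longest => (r[c]?).map fun s =>
        if PySem.Str.len s > PySem.Str.len longest then s else longest)
      (some acc)
    = some (tbl.foldl
        (fun longest r => if PySem.Str.len (r.getD c "") > PySem.Str.len longest then r.getD c "" else longest)
        acc) := by
  intro tbl
  induction tbl with
  | nil => intro acc _; rfl
  | cons r tbl ih =>
    intro acc h
    have hr : c < r.length := h r (by simp)
    simp only [List.foldl_cons, List.getElem?_eq_getElem hr,
      Option.bind_some, Option.map_some, List.getD_eq_getElem r "" hr]
    exact ih _ (fun row hrow => h row (by simp [hrow]))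

theorem pvLa1 (c : Nat) (tbl : List (List String)) (acc : String) (h : ∀ row ∈ tbl, c < row.length) :
    tbl.foldl
      (fun a r => a.bind fun longest => (PySem.List.pyGet? r (c:Int)).map fun s =>
        if PySem.Str.len s > PySem.Str.len longest then s else longest)
      (some acc)
    = some (tbl.foldl
        (fun longest r => if PySem.Str.len (r.getD c "") > PySem.Str.len longest then r.getD c "" else longest)
        acc) := by
  simp only [PySem.List.pyGet?_natCast]
  exact pvLa1' c tbl acc h

theorem pvLa2 (c : Nat) : ∀ (tbl : List (List String)) (acc : String),
    PySem.Str.len (tbl.foldl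
      (fun longest r => if PySem.Str.len (r.getD c "") > PySem.Str.len longest then r.getD c "" else longest) acc)
    = tbl.foldl (fun m r => max m (PySem.Str.len (r.getD c ""))) (PySem.Str.len acc) := by
  intro tbl
  induction tbl with
  | nil => intro acc; rfl
  | cons r tbl ih =>
    intro acc
    simp only [List.foldl_cons, ih, pvLenIf]

theorem pvLa3 (tbl : List (List String)) (title : List String) (c : Nat)
    (ht : c < title.length) (hr : ∀ row ∈ tbl, c < row.length) :
    pvFindMaxStringLength tbl (c:Int) title = some (pvW tbl title c) := by
  unfold pvFindMaxStringLength
  rw [pvLa1 c tbl "" hr]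
  simp only [Option.bind_some, PySem.List.pyGet?_natCast, List.getElem?_eq_getElem ht,
    Option.map_some, Option.some.injEq, pvLenIf, pvLa2, pvW,
    List.getD_eq_getElem title "" ht]
  norm_num

theorem pvRangeMapGetD (ws : List Int) :
    (List.range ws.length).map (fun c => ws.getD c 0) = ws := by
  apply List.ext_getElem
  · simp
  · intro i h1 h2
    simp [List.getElem?_eq_getElem h2]

theorem pvLb1 : ∀ (cells : List String) (pre ws : List Int), ws.length = cells.length →
    (PySem.List.enumerate cells (pre.length:Int)).foldl
      (fun ws2 p =>
        if PySem.Str.len p.2 > PySem.List.pyGetD ws2 p.1 0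
        then PySem.List.pySetD ws2 p.1 (PySem.Str.len p.2) else ws2)
      (pre ++ ws)
    = pre ++ List.zipWith (fun w s => max w (PySem.Str.len s)) ws cells := by
  intro cells
  induction cells with
  | nil =>
    intro pre ws hlen
    rw [List.length_eq_zero_iff.mp hlen]
    rfl
  | cons s cells ih =>
    intro pre ws hlen
    match ws with
    | [] => simp at hlen
    | w :: ws' =>
      have hget : PySem.List.pyGetD (pre ++ w :: ws') (pre.length:Int) 0 = w := by simp [pysem]
      have hset : ∀ v, PySem.List.pySetD (pre ++ w :: ws') (pre.length:Int) v = pre ++ v :: ws' := by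
        intro v; simp [PySem.List.pySetD, PySem.List.pySet?, PySem.List.pyIdx?]
      have hstep :
          (if PySem.Str.len s > PySem.List.pyGetD (pre ++ w :: ws') (pre.length:Int) 0
           then PySem.List.pySetD (pre ++ w :: ws') (pre.length:Int) (PySem.Str.len s)
           else pre ++ w :: ws')
          = pre ++ max w (PySem.Str.len s) :: ws' := by
        rw [hget]
        split_ifs with h
        · rw [hset, max_eq_right (le_of_lt h)]
        · rw [max_eq_left (le_of_not_gt h)]
      have harg : pre ++ max w (PySem.Str.len s) :: ws' = (pre ++ [max w (PySem.Str.len s)]) ++ ws' := by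
        simp
      have hstart : (pre.length:Int) + 1 = (((pre ++ [max w (PySem.Str.len s)]).length : Nat) : Int) := by
        simp
      simp only [PySem.List.enumerate, List.foldl_cons, hstep]
      rw [harg, hstart, ih (pre ++ [max w (PySem.Str.len s)]) ws' (by simpa using hlen)]
      simp

theorem pvLb2 (N : Nat) : ∀ (tbl : List (List String)) (ws : List Int), ws.length = N →
    (∀ row ∈ tbl, N ≤ row.length) →
    tbl.foldl
      (fun ws row =>
        (PySem.List.enumerate (PySem.List.slice row none (some (N:Int)))).foldl
          (fun ws2 p =>
            if PySem.Str.len p.2 > PySem.List.pyGetD ws2 p.1 0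
            then PySem.List.pySetD ws2 p.1 (PySem.Str.len p.2) else ws2)
          ws)
      ws
    = (List.range N).map
        (fun c => tbl.foldl (fun m row => max m (PySem.Str.len (row.getD c ""))) (ws.getD c 0)) := by
  intro tbl
  induction tbl with
  | nil =>
    intro ws hlen _
    simp only [List.foldl_nil]
    rw [← hlen, pvRangeMapGetD]
  | cons r tbl ih =>
    intro ws hlen h
    have hr : N ≤ r.length := h r (by simp)
    have hslice : PySem.List.slice r none (some (N:Int)) = r.take N := by simp [pysem]
    have htake : (r.take N).length = N := by simp [hr]
    simp only [List.foldl_cons, hslice]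
    have hfold := pvLb1 (r.take N) [] ws (by omega)
    simp only [List.nil_append, List.length_nil, Nat.cast_zero] at hfold
    rw [hfold]
    rw [ih _ (by simp [hlen, htake]) (fun row hrow => h row (by simp [hrow]))]
    apply List.map_congr_left
    intro c hc
    have hcN : c < N := List.mem_range.mp hc
    have hz : (List.zipWith (fun w s => max w (PySem.Str.len s)) ws (r.take N)).getD c 0
        = max (ws.getD c 0) (PySem.Str.len (r.getD c "")) := by
      have h1 : c < ws.length := by omega
      have h2 : c < (r.take N).length := by omega
      rw [List.getD_eq_getElem _ 0 (by simp; omega), List.getElem_zipWith,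
        List.getD_eq_getElem ws 0 h1, List.getD_eq_getElem r "" (by omega)]
      rw [List.getElem_take]
    rw [hz]

theorem pvFoldMaxInit (f : List String → Int) :
    ∀ (l : List (List String)) (a b : Int),
    l.foldl (fun m x => max m (f x)) (max a b) = max (l.foldl (fun m x => max m (f x)) a) b := by
  intro l
  induction l with
  | nil => intro a b; rfl
  | cons x l ih =>
    intro a b
    simp only [List.foldl_cons, max_right_comm a b (f x), ih]

theorem pvLa4' (F : List Char → Int → List Char) (g : Nat → Option Int) (W : Nat → Int) :
    ∀ (ks : List Nat) (acc : List Char), (∀ k ∈ ks, g k = some (W k)) →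
    ks.foldl (fun a k => a.bind fun b => (g k).map fun d => F b d) (some acc)
      = some (ks.foldl (fun b k => F b (W k)) acc) := by
  intro ks
  induction ks with
  | nil => intro acc _; rfl
  | cons k ks ih =>
    intro acc h
    simp only [List.foldl_cons, h k (by simp), Option.bind_some, Option.map_some]
    exact ih _ (fun x hx => h x (by simp [hx]))

theorem pvLenNonneg (s : String) : 0 ≤ PySem.Str.len s := by simp [PySem.Str.len_eq]

theorem pvFoldlConst {α β : Type} (l : List α) (init : β) : l.foldl (fun s _ => s) init = init := by
  induction l <;> simp [*]

theorem pvMain (table : List (List String)) (n : Int) (title : List String)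
    (rt : String) (MIN PAD : Int)
    (hpre : 0 < n → (n ≤ (title.length : Int) ∧ ∀ row ∈ table, n ≤ (row.length : Int))) :
    create_border_row table n title rt MIN PAD = create_border_row_alt table n title rt MIN PAD := by
  by_cases hn : n ≤ 0
  · -- columns_amount ≤ 0 : both sides are "|"
    have hrange : PySem.List.pyRange 0 n = [] := by
      rw [PySem.List.pyRange_one]; simp; omega
    have hm : max n 0 = 0 := max_eq_right hn
    unfold create_border_row create_border_row_alt
    simp only [hrange, hm, List.foldl_nil]
    have hsl : PySem.List.slice title none (some (0:Int)) = ([] : List String) := by simp [pysem]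
    simp only [hsl, List.map_nil]
    have : ∀ row : List String, PySem.List.slice row none (some (0:Int)) = ([] : List String) := by
      intro row; simp [pysem]
    simp only [this]
    rw [show (PySem.List.enumerate ([] : List String) 0) = [] from rfl]
    simp only [List.foldl_nil, pvFoldlConst]
  · have hn : 0 < n := by omega
    obtain ⟨ht, hrows⟩ := hpre hn
    set N := n.toNat with hNdef
    have hcast : ((N : Nat) : Int) = n := Int.toNat_of_nonneg hn.le
    have htN : N ≤ title.length := by omega
    have hrowsN : ∀ row ∈ table, N ≤ row.length := by
      intro row hrow; have := hrows row hrow; omega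
    unfold create_border_row create_border_row_alt
    rw [← hcast, PySem.List.pyRange_zero_natCast, List.foldl_map]
    rw [pvLa4' (fun b d =>
          if d ≥ MIN then b ++ (PySem.List.pyRepeat ['-'] (d + PAD) ++ ['|'])
          else b ++ (PySem.List.pyRepeat ['-'] MIN ++ ['|']))
        (fun k => pvFindMaxStringLength table (k : Int) title)
        (fun k => pvW table title k)
        (List.range N) ['|']
        (fun k hk => pvLa3 table title k (by exact lt_of_lt_of_le (List.mem_range.mp hk) htN) 
          (fun row hrow => lt_of_lt_of_le (List.mem_range.mp hk) (hrowsN row hrow)))]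
    have hm : max ((N:Int)) 0 = (N:Int) := max_eq_left (by positivity)
    simp only [hm]
    have hslt : PySem.List.slice title none (some (N:Int)) = title.take N := by simp [pysem]
    rw [hslt]
    have hws0 : ((title.take N).map PySem.Str.len).length = N := by simp [htN]
    rw [pvLb2 N table _ hws0 hrowsN]
    rw [List.foldl_map]
    congr 1
    apply PySem.List.foldl_congr_mem
    intro acc k hk
    have hkN : k < N := List.mem_range.mp hk
    have hget : ((title.take N).map PySem.Str.len).getD k 0 = PySem.Str.len (title.getD k "") := by
      rw [List.getD_eq_getElem _ 0 (by simp; omega), List.getElem_map, List.getElem_take,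
        List.getD_eq_getElem title "" (by omega)]
    rw [hget]
    have hfold : table.foldl (fun m row => max m (PySem.Str.len (row.getD k "")))
          (PySem.Str.len (title.getD k "")) = pvW table title k := by
      rw [show PySem.Str.len (title.getD k "") = max 0 (PySem.Str.len (title.getD k "")) from
        (max_eq_right (pvLenNonneg _)).symm]
      rw [pvFoldMaxInit]
      rfl
    rw [hfold]

-- ===== VERDICT (by name: the statement is the Claim_ definition above) =====
theorem create_border_row_spec : Claim_equal_create_border_row := by
  intro table columns_amount title_list row_type MIN_COLUMN_WIDTH CELL_PADDING _ hpre
  unfold Spec_create_border_row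
  exact pvMain table columns_amount title_list row_type MIN_COLUMN_WIDTH CELL_PADDING hpre
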